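-- pv_equiv track=rewrite | github.com/demeet2k/athena-square-earth | MATH/FINAL FORM/FRAMEWORKS CODE/Athena OS/athena_os/ifa/hypercube.py | path_between
-- ===== SOURCE A (Python) =====
-- from typing import Dict, List, Optional, Any, Tuple, Iterator
--
-- def path_between(start: int, end: int) -> List[int]:
--     """
--     Find shortest path between two Odù.
--
--     In a hypercube, the shortest path follows the differing bits.
--     """
--     diff = start ^ end
--     path = [start]
--     current = start
--
--     for i in range(8):
--         if diff & (1 << i):
--             current ^= (1 << i)
--             path.append(current)
--
--     return path
-- ===== SOURCE B (Python) =====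
-- def path_between(start: int, end: int):
--     def scan(cur, masks):
--         if not masks:
--             return [cur]
--         return [cur] + scan(cur ^ masks[0], masks[1:])
--     masks = [1 << i for i in range(8) if (start ^ end) & (1 << i)]
--     return scan(start, masks)
-- ===== Notes on version B (the rewrite author's own statement) =====
-- stated objective: alternative
-- what changed: Replaces the single stateful toggle-and-append loop by a two-phase decomposition: first collect the differing-bit masks, then build the path as a recursive XOR prefix-scan constructed by cons.
import Mathlib
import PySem

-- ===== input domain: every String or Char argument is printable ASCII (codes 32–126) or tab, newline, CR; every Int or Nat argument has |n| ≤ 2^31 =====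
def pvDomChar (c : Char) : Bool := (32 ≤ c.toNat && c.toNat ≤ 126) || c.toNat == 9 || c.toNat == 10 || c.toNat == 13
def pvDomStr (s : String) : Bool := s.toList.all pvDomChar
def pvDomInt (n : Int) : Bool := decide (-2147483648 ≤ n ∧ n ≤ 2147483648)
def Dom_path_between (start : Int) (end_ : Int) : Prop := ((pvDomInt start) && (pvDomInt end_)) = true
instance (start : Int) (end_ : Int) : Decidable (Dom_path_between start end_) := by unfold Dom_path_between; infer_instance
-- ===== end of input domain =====

-- B replaces A's stateful toggle-and-append loop by a two-phase decomposition (collect masks, then a recursive XOR prefix-scan); same cost, alternative structure.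

-- ===== PORT A =====
def path_between (start : Int) (end_ : Int) : List Int :=
  let diff := PySem.Int.bxor start end_
  let res := (PySem.List.pyRange 0 8 1).foldl
    (fun (st : List Int × Int) i =>
      if PySem.Int.band diff ((1 : Int) <<< i.toNat) != 0 then
        (st.1 ++ [PySem.Int.bxor st.2 ((1 : Int) <<< i.toNat)],
         PySem.Int.bxor st.2 ((1 : Int) <<< i.toNat))
      else st) ([start], start)
  res.1

-- ===== PORT B =====
-- helper 'scan' of Source B: recursive XOR prefix-scan built by cons
def pbScan (cur : Int) (masks : List Int) : List Int :=
  match masks with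
  | [] => [cur]
  | m :: rest => [cur] ++ pbScan (PySem.Int.bxor cur m) rest

def path_between_alt (start : Int) (end_ : Int) : List Int :=
  let masks := ((PySem.List.pyRange 0 8 1).filter
      (fun i => PySem.Int.band (PySem.Int.bxor start end_) ((1 : Int) <<< i.toNat) != 0)).map
      (fun i => (1 : Int) <<< i.toNat)
  pbScan start masks

-- ===== PRECONDITION & SPEC =====
def Spec_path_between (start : Int) (end_ : Int) (out : List Int) : Prop := out = path_between_alt start end_
instance (start : Int) (end_ : Int) (out : List Int) : Decidable (Spec_path_between start end_ out) := by unfold Spec_path_between; infer_instance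

-- ===== CLAIM (what is proved, stated in full; the proofs are below) =====
def Claim_equal_path_between : Prop := ∀ (start : Int) (end_ : Int), Dom_path_between start end_ → Spec_path_between start end_ (path_between start end_)

-- ===== LEMMAS AND PROOFS =====
-- A's fold, started with path = p ++ [c] and current = c, produces p followed by
-- the prefix-scan of the masks of the remaining indices.
theorem pbKey (diff : Int) (l : List Int) (p : List Int) (c : Int) :
    (l.foldl (fun (st : List Int × Int) i =>
        if PySem.Int.band diff ((1 : Int) <<< i.toNat) != 0 then
          (st.1 ++ [PySem.Int.bxor st.2 ((1 : Int) <<< i.toNat)],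
           PySem.Int.bxor st.2 ((1 : Int) <<< i.toNat))
        else st) (p ++ [c], c)).1
    = p ++ pbScan c ((l.filter
        (fun i => PySem.Int.band diff ((1 : Int) <<< i.toNat) != 0)).map
        (fun i => (1 : Int) <<< i.toNat)) := by
  induction l generalizing p c with
  | nil => simp [pbScan]
  | cons i l ih =>
    simp only [List.foldl_cons, List.filter_cons]
    split_ifs with h
    · simpa [pbScan, List.append_assoc] using
        ih (p ++ [c]) (PySem.Int.bxor c ((1 : Int) <<< max i 0))
    · simpa using ih p c
-- ===== VERDICT (by name: the statement is the Claim_ definition above) =====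
theorem path_between_spec : Claim_equal_path_between := by
  intro start end_ _
  show path_between start end_ = path_between_alt start end_
  simp only [path_between, path_between_alt]
  simpa using pbKey (PySem.Int.bxor start end_) (PySem.List.pyRange 0 8 1) [] start
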